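-- pv_equiv track=rewrite | github.com/gridvisi/Python_workspace | brilliant/loop and slice/daily-problems_senior-prank.py | change_clor
-- ===== SOURCE A (Python) =====
-- def change_clor(n):
--     step = 2
--     block = ["y"]*n
--     while step <= 50:
--         for i in range(1,n,step):
--             if block[i] == "b":
--                 block[i] = "y"
--             elif block[i] == "y":
--                 block[i] = "b"
--         step += 1
--     return [i for i,e in enumerate(block) if e == "y"]
-- ===== SOURCE B (Python) =====
-- def change_clor(n):
--     # position j stays 'y' iff it was toggled an even number of times,
--     # i.e. the number of steps k in 2..50 with (j - 1) % k == 0 is even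
--     return [j for j in range(n)
--             if sum(1 for k in range(2, 51) if (j - 1) % k == 0) % 2 == 0]
-- ===== Notes on version B (the rewrite author's own statement) =====
-- stated objective: alternative
-- what changed: Replaces the multi-pass in-place toggle simulation over a mutable cell array by a single per-position comprehension that counts the steps k in 2..50 dividing j-1 and keeps j when that count is even.
import Mathlib
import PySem

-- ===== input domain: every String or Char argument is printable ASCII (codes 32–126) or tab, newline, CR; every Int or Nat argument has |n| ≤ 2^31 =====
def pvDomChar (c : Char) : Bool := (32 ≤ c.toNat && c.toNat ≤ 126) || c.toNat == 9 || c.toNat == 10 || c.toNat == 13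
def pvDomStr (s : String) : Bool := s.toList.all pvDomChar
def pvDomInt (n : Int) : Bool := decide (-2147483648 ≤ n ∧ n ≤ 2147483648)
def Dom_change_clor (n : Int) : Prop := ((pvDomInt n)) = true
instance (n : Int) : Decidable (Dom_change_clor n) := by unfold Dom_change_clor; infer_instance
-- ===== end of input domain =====

-- B replaces A's multi-pass in-place toggle simulation by a per-position divisor-count
-- parity test (alternative decomposition; no speed claim).

-- ===== PORT A =====
-- body of A's inner 'for' loop: toggle block[i] between "b" and "y"
def pvStep (b : List String) (i : Int) : List String :=
  if PySem.List.pyGetD b i "" == "b" then PySem.List.pySetD b i "y"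
  else if PySem.List.pyGetD b i "" == "y" then PySem.List.pySetD b i "b"
  else b

def change_clor (n : Int) : List Int :=
  let block := List.replicate n.toNat "y"
  -- 'step = 2; while step <= 50: …; step += 1' = for step in range(2, 51)
  let final := (PySem.List.pyRange 2 51).foldl
      (fun b step => (PySem.List.pyRange 1 n step).foldl pvStep b) block
  (PySem.List.enumerate final).filterMap
      (fun ie => if ie.2 == "y" then some ie.1 else none)

-- ===== PORT B =====
def change_clor_alt (n : Int) : List Int :=
  (PySem.List.pyRange 0 n).filter (fun j =>
    PySem.Int.mod ((PySem.List.pyRange 2 51).foldl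
        (fun acc k => if PySem.Int.mod (j - 1) k == 0 then acc + 1 else acc) 0) 2 == 0)

-- ===== PRECONDITION & SPEC =====
def Spec_change_clor (n : Int) (out : List Int) : Prop := out = change_clor_alt n
instance (n : Int) (out : List Int) : Decidable (Spec_change_clor n out) := by unfold Spec_change_clor; infer_instance

-- ===== CLAIM (what is proved, stated in full; the proofs are below) =====
def Claim_equal_change_clor : Prop := ∀ (n : Int), Dom_change_clor n → Spec_change_clor n (change_clor n)

-- ===== LEMMAS AND PROOFS =====

-- the toggle as a function on a cell's contents
def pvTog (s : String) : String := if s == "b" then "y" else if s == "y" then "b" else s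

-- toggle count of position j: number of steps s in 2..50 whose pass hits j
def pvCnt (n : Int) (j : Nat) : Nat :=
  (PySem.List.pyRange 2 51).countP (fun s => decide ((j : Int) ∈ PySem.List.pyRange 1 n s))

theorem pvStep_length (b : List String) (i : Int) : (pvStep b i).length = b.length := by
  unfold pvStep; split_ifs <;> simp [PySem.List.length_pySetD]

theorem foldl_pvStep_length (l : List Int) (b : List String) :
    (l.foldl pvStep b).length = b.length := by
  induction l generalizing b with
  | nil => rfl
  | cons i l ih => simp [List.foldl_cons, ih, pvStep_length]

theorem foldl_outer_length (n : Int) (L : List Int) (b : List String) :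
    (L.foldl (fun b s => (PySem.List.pyRange 1 n s).foldl pvStep b) b).length = b.length := by
  induction L generalizing b with
  | nil => rfl
  | cons s L ih => rw [List.foldl_cons, ih, foldl_pvStep_length]

-- one toggle at index i changes only cell i, by pvTog
theorem pvStep_get (b : List String) (i : Int) (h0 : 0 ≤ i) (h1 : i < (b.length : Int))
    (j : Nat) : (pvStep b i)[j]? = if (j : Int) = i then (b[j]?).map pvTog else b[j]? := by
  have hi : i.toNat < b.length := by omega
  have hg : PySem.List.pyGetD b i "" = b[i.toNat] := PySem.List.pyGetD_eq_getElem b "" h0 h1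
  have hji : ((j : Int) = i) ↔ (j = i.toNat) := by omega
  unfold pvStep pvTog
  rw [hg, PySem.List.pySetD_of_nonneg b "y" h0, PySem.List.pySetD_of_nonneg b "b" h0]
  by_cases hj : j = i.toNat
  · subst hj
    simp only [hji, List.getElem?_eq_getElem hi, Option.map_some]
    by_cases hb : b[i.toNat] = "b"
    · simp [hb, hi]
    · by_cases hy : b[i.toNat] = "y"
      · simp [hy, hi]
      · simp [hb, hy]
  · rw [if_neg (by omega : ¬ ((j : Int) = i))]
    split_ifs <;> simp [List.getElem?_set_ne (by omega : i.toNat ≠ j)]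

-- one full pass (distinct in-range indices) toggles exactly the visited cells
theorem inner_get (l : List Int) (b : List String)
    (hp : l.Pairwise (· < ·)) (hb : ∀ i ∈ l, 0 ≤ i ∧ i < (b.length : Int)) (j : Nat) :
    (l.foldl pvStep b)[j]? = if (j : Int) ∈ l then (b[j]?).map pvTog else b[j]? := by
  induction l generalizing b with
  | nil => simp
  | cons i l ih =>
    obtain ⟨h0, h1⟩ := hb i (List.mem_cons_self)
    have hlen : (pvStep b i).length = b.length := pvStep_length b i
    rw [List.foldl_cons, ih (pvStep b i) hp.of_cons
        (fun x hx => by rw [hlen]; exact hb x (List.mem_cons_of_mem i hx))]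
    have hnotin : i ∉ l := by
      intro hmem
      exact absurd (List.rel_of_pairwise_cons hp hmem) (lt_irrefl i)
    by_cases hm : (j : Int) ∈ l
    · have hne : (j : Int) ≠ i := fun h => hnotin (h ▸ hm)
      rw [if_pos hm, if_pos (List.mem_cons_of_mem i hm),
          pvStep_get b i h0 h1 j, if_neg hne]
    · rw [if_neg hm, pvStep_get b i h0 h1 j]
      by_cases he : (j : Int) = i
      · rw [if_pos he, if_pos (by simp [he])]
      · rw [if_neg he, if_neg (by simp [he, hm])]

theorem pyRange_pairwise_lt (a b s : Int) (hs : 0 < s) :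
    (PySem.List.pyRange a b s).Pairwise (· < ·) := by
  rw [PySem.List.pyRange_of_pos a b hs]
  refine List.Pairwise.map _ (fun x y h => ?_) List.pairwise_lt_range
  have : s * (x : Int) < s * y := by
    have := Int.ofNat_lt.mpr h
    nlinarith
  omega

-- all passes together: cell j is toggled once per step s whose range contains j
theorem outer_get (n : Int) (L : List Int) (b : List String)
    (hL : ∀ s ∈ L, 0 < s) (hb : b.length = n.toNat) (j : Nat) :
    ((L.foldl (fun b s => (PySem.List.pyRange 1 n s).foldl pvStep b) b)[j]?) =
      (b[j]?).map (pvTog^[L.countP (fun s => decide ((j : Int) ∈ PySem.List.pyRange 1 n s))]) := by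
  induction L generalizing b with
  | nil => simp
  | cons s L ih =>
    have hs : 0 < s := hL s List.mem_cons_self
    have hbound : ∀ i ∈ PySem.List.pyRange 1 n s, 0 ≤ i ∧ i < (b.length : Int) := by
      intro i hi
      obtain ⟨hi1, hi2, -⟩ := (PySem.List.mem_pyRange_iff_of_pos hs i).mp hi
      constructor
      · omega
      · rw [hb]; omega
    rw [List.foldl_cons, ih _ (fun x hx => hL x (List.mem_cons_of_mem s hx))
        (by rw [foldl_pvStep_length]; exact hb),
      inner_get _ b (pyRange_pairwise_lt 1 n s hs) hbound j, List.countP_cons]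
    by_cases hm : (j : Int) ∈ PySem.List.pyRange 1 n s
    · simp only [hm, decide_true, if_pos, Option.map_map]
      rw [Function.iterate_succ]
    · rw [if_neg hm]
      simp [hm]

theorem pvTog_iter (c : Nat) : pvTog^[c] "y" = if c % 2 = 0 then "y" else "b" := by
  induction c with
  | zero => simp
  | succ c ih =>
    rw [Function.iterate_succ_apply', ih]
    by_cases h : c % 2 = 0
    · rw [if_pos h, if_neg (by omega)]; rfl
    · rw [if_neg h, if_pos (by omega)]; rfl

theorem filterMap_ite {α β : Type} (l : List β) (p : β → Bool) (c : β → α) :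
    l.filterMap (fun x => if p x then some (c x) else none) = (l.filter p).map c := by
  induction l with
  | nil => rfl
  | cons x l ih => by_cases h : p x <;> simp [h, ih]

theorem change_clor_eq (n : Int) :
    change_clor n =
      ((List.range n.toNat).filter (fun j => pvCnt n j % 2 == 0)).map (fun j => Int.ofNat j) := by
  have hdef : change_clor n = (PySem.List.enumerate ((PySem.List.pyRange 2 51).foldl
      (fun b step => (PySem.List.pyRange 1 n step).foldl pvStep b) (List.replicate n.toNat "y"))).filterMap
      (fun ie => if ie.2 == "y" then some ie.1 else none) := rfl
  rw [hdef]
  set block := List.replicate n.toNat "y" with hblock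
  set final := (PySem.List.pyRange 2 51).foldl
      (fun b step => (PySem.List.pyRange 1 n step).foldl pvStep b) block with hfinal
  have hlen : final.length = n.toNat := by
    rw [hfinal, foldl_outer_length]
    simp [hblock]
  have hget : ∀ j : Nat, j < n.toNat → final[j]? = some (pvTog^[pvCnt n j] "y") := by
    intro j hj
    rw [hfinal, outer_get n _ block
        (fun s hs => by
          have := PySem.List.mem_pyRange_one.mp hs
          omega)
        (by simp [hblock]) j]
    rw [hblock, List.getElem?_replicate, if_pos hj]
    rfl
  rw [PySem.List.enumerate_eq_map_pyRange final ""]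
  rw [PySem.List.len_eq, ← hlen, PySem.List.pyRange_zero_nat, List.filterMap_map,
      List.filterMap_map]
  rw [List.filterMap_congr (g := fun k : Nat =>
        if (pvCnt n k % 2 == 0 : Bool) then some (Int.ofNat k) else none)]
  · rw [filterMap_ite, hlen]
  · intro k hk
    have hk' : k < n.toNat := by rw [← hlen]; exact List.mem_range.mp hk
    have : PySem.List.pyGetD final (k : Int) "" = pvTog^[pvCnt n k] "y" := by
      rw [PySem.List.pyGetD_natCast, List.getD_eq_getElem?_getD, hget k hk']
      rfl
    simp only [Function.comp_apply, this, pvTog_iter]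
    by_cases h : pvCnt n k % 2 = 0
    · simp [h]
    · simp [h]

-- j is hit by step s  ↔  (j-1) % s == 0  (for 0 ≤ j < n, 2 ≤ s; j = 0 gives (-1) % s = s-1 ≠ 0)
theorem mem_iff_mod (n : Int) (k : Nat) (hk : k < n.toNat) (s : Int) (hs2 : 2 ≤ s) :
    ((k : Int) ∈ PySem.List.pyRange 1 n s) ↔ PySem.Int.mod ((k : Int) - 1) s = 0 := by
  rw [PySem.List.mem_pyRange_iff_of_pos (by omega), PySem.Int.mod_eq_zero_iff_dvd]
  constructor
  · rintro ⟨-, -, h⟩; exact h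
  · intro h
    refine ⟨?_, by omega, h⟩
    by_contra hlt
    have hk0 : k = 0 := by omega
    subst hk0
    have hneg : ((0 : Nat) : Int) - 1 = -1 := by norm_num
    rw [hneg] at h
    have h1 : s ∣ (1 : Int) := dvd_neg.mp h
    have := Int.le_of_dvd one_pos h1
    omega

theorem change_clor_alt_eq (n : Int) :
    change_clor_alt n =
      ((List.range n.toNat).filter (fun j => pvCnt n j % 2 == 0)).map (fun j => Int.ofNat j) := by
  unfold change_clor_alt
  rw [PySem.List.pyRange_zero, List.filter_map]
  congr 1
  apply List.filter_congr
  intro k hk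
  have hk' : k < n.toNat := List.mem_range.mp hk
  simp only [Function.comp_apply]
  rw [PySem.List.foldl_if_add_one (fun s => PySem.Int.mod ((k : Int) - 1) s == 0)]
  have hc : (PySem.List.pyRange 2 51).countP (fun s => PySem.Int.mod ((k : Int) - 1) s == 0)
      = pvCnt n k := by
    apply List.countP_congr
    intro s hs
    have hs2 : 2 ≤ s := (PySem.List.mem_pyRange_one.mp hs).1
    simp only [beq_iff_eq, decide_eq_true_eq]
    exact (mem_iff_mod n k hk' s hs2).symm
  rw [hc]
  have hm : PySem.Int.mod (0 + (pvCnt n k : Int)) 2 = ((pvCnt n k % 2 : Nat) : Int) := by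
    rw [PySem.Int.mod_eq_emod_of_pos (by norm_num)]
    omega
  rw [hm, Bool.eq_iff_iff]
  simp
  omega

-- ===== VERDICT (by name: the statement is the Claim_ definition above) =====
theorem change_clor_spec : Claim_equal_change_clor := by
  intro n _
  unfold Spec_change_clor
  rw [change_clor_eq, change_clor_alt_eq]
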